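-- pv_equiv track=rewrite | github.com/TheBoyMoe/DataScience-Repo | Safari-books-online/Getting-started-with-python3/markov.py | get_table_refactored
-- ===== SOURCE A (Python) =====
-- def get_table_refactored(data):
--     ''' This is a function docstring
--     This will return a transition table
--
--     >>> get_table('ab')
--     {'a': {'b': 1}}
--     '''
--     results = {}   # dictionary literal
--     for i, char in enumerate(data):
--         try:
--             out = data[i+1]
--         except IndexError:
--             break
--         char_dict = results.get(char, {})
--         char_dict.setdefault(out, 0)
--         char_dict[out] += 1
--         results[char] = char_dict
--     return results
-- ===== SOURCE B (Python) =====
-- def get_table_refactored(data):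
--     pairs = list(zip(data, data[1:]))
--     results = {}
--     for c in dict.fromkeys(h for h, _ in pairs):
--         outs = [o for h, o in pairs if h == c]
--         results[c] = {o: outs.count(o) for o in dict.fromkeys(outs)}
--     return results
-- ===== Notes on version B (the rewrite author's own statement) =====
-- stated objective: alternative
-- what changed: A makes one incremental pass over the string, updating a nested count dict per adjacent pair with exception-based boundary detection; B instead groups by leading character: for each distinct leading character it rescans the pair list to collect that character's successors and builds its row by counting each distinct successor with list.count, with no incremental counting anywhere.
import Mathlib
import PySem

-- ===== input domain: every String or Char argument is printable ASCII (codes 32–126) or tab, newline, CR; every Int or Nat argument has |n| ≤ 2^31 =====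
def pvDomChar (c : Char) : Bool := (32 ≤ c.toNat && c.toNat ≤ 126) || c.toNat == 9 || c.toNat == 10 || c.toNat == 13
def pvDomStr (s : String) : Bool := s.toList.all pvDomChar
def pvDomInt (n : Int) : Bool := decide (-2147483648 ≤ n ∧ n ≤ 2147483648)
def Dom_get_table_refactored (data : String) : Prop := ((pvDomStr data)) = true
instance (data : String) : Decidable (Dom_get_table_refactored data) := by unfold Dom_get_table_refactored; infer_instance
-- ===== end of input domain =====

-- B replaces A's single incremental counting pass (exception-based boundary detection, nested
-- count dict updated per pair) by a group-by decomposition: for each distinct leading character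
-- it rescans the pair list and builds that row by counting each distinct successor with list.count.

-- ===== PORT A =====
-- the loop body: char_dict = results.get(char, {}); char_dict.setdefault(out, 0); char_dict[out] += 1; results[char] = char_dict
def pvA_step (r : PySem.Dict String (PySem.Dict String Int)) (c o : String) :
    PySem.Dict String (PySem.Dict String Int) :=
  let char_dict := r.getD c PySem.Dict.empty
  let char_dict := char_dict.setdefault o 0
  let char_dict := char_dict.modify o 0 (· + 1)
  r.insert c char_dict

-- for i, char in enumerate(data): try out = data[i+1] except IndexError: break; <body>
def pvA_loop (full : List Char) : List Char → Nat → PySem.Dict String (PySem.Dict String Int) →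
    PySem.Dict String (PySem.Dict String Int)
  | [], _, r => r
  | ch :: rest, i, r =>
    match PySem.List.pyGet? full ((i : Int) + 1) with
    | none => r
    | some out => pvA_loop full rest (i + 1) (pvA_step r (String.ofList [ch]) (String.ofList [out]))

def get_table_refactored (data : String) : List (String × List (String × Int)) :=
  let cs := data.toList
  ((pvA_loop cs cs 0 PySem.Dict.empty).items).map (fun p => (p.1, p.2.items))

-- ===== PORT B =====
-- outs = [o for h, o in pairs if h == c]; {o: outs.count(o) for o in dict.fromkeys(outs)}
def pvB_row (pairs : List (String × String)) (c : String) : PySem.Dict String Int :=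
  let outs := (pairs.filter (fun p => p.1 == c)).map (fun p => p.2)
  (PySem.List.dedup outs).foldl (fun d o => d.insert o (outs.count o : Int)) PySem.Dict.empty

def get_table_refactored_alt (data : String) : List (String × List (String × Int)) :=
  let cs := data.toList
  -- pairs = list(zip(data, data[1:]))
  let pairs := (cs.zip (PySem.List.slice cs (some 1))).map (fun p => (String.ofList [p.1], String.ofList [p.2]))
  -- for c in dict.fromkeys(h for h, _ in pairs): results[c] = {o: outs.count(o) for o in dict.fromkeys(outs)}
  let results := (PySem.List.dedup (pairs.map (fun p => p.1))).foldl
      (fun r c => r.insert c (pvB_row pairs c)) PySem.Dict.empty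
  results.items.map (fun p => (p.1, p.2.items))

-- ===== PRECONDITION & SPEC =====
def Spec_get_table_refactored (data : String) (out : List (String × List (String × Int))) : Prop := out = get_table_refactored_alt data
instance (data : String) (out : List (String × List (String × Int))) : Decidable (Spec_get_table_refactored data out) := by unfold Spec_get_table_refactored; infer_instance

-- ===== CLAIM (what is proved, stated in full; the proofs are below) =====
def Claim_equal_get_table_refactored : Prop := ∀ (data : String), Dom_get_table_refactored data → Spec_get_table_refactored data (get_table_refactored data)

-- ===== LEMMAS AND PROOFS =====

-- the canonical nested-increment step A's loop body reduces to
def pvStep (r : PySem.Dict String (PySem.Dict String Int)) (p : String × String) :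
    PySem.Dict String (PySem.Dict String Int) :=
  r.insert p.1 ((r.getD p.1 PySem.Dict.empty).insert p.2 ((r.getD p.1 PySem.Dict.empty).getD p.2 0 + 1))

def pvPairs (cs : List Char) : List (String × String) :=
  (cs.zip cs.tail).map (fun p => (String.ofList [p.1], String.ofList [p.2]))

-- canonical grouped table: outer keys = distinct firsts in order; inner = distinct pairs with that first, with counts
def pvInner (ps : List (String × String)) (c : String) : List (String × Int) :=
  ((PySem.Set.ofList ps).filter (fun p => p.1 == c)).map (fun p => (p.2, (ps.count p : Int)))

def pvCanon (ps : List (String × String)) : PySem.Dict String (PySem.Dict String Int) :=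
  PySem.Dict.mk ((PySem.Set.ofList (ps.map Prod.fst)).map (fun c => (c, PySem.Dict.mk (pvInner ps c))))

-- generic small facts
theorem pvSet_append_singleton {α : Type} [BEq α] (l : List α) (x : α) :
    PySem.Set.ofList (l ++ [x]) = PySem.Set.add (PySem.Set.ofList l) x := by
  simp [PySem.Set.ofList, List.foldl_append]

theorem pvSet_add_mem {α : Type} [BEq α] [LawfulBEq α] (s : PySem.Set α) (x : α) (h : x ∈ s) :
    PySem.Set.add s x = s := by
  simp only [PySem.Set.add]
  rw [if_pos (by simpa using h)]

theorem pvSet_add_not_mem {α : Type} [BEq α] [LawfulBEq α] (s : PySem.Set α) (x : α) (h : x ∉ s) :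
    PySem.Set.add s x = s ++ [x] := by
  simp only [PySem.Set.add]
  rw [if_neg (by simpa using h)]

theorem pvSet_ofList_map_ofList {α β : Type} [BEq α] [LawfulBEq α] [BEq β] [LawfulBEq β]
    (f : α → β) (l : List α) :
    PySem.Set.ofList ((PySem.Set.ofList l).map f) = PySem.Set.ofList (l.map f) := by
  induction l using List.reverseRecOn with
  | nil => rfl
  | append_singleton l x ih =>
    rw [List.map_append, List.map_singleton, pvSet_append_singleton, pvSet_append_singleton]
    by_cases hx : x ∈ PySem.Set.ofList l
    · rw [pvSet_add_mem _ _ hx, ih]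
      have hfx : f x ∈ PySem.Set.ofList (l.map f) := by
        rw [PySem.Set.mem_ofList]
        exact List.mem_map.mpr ⟨x, (PySem.Set.mem_ofList _ _).mp hx, rfl⟩
      exact (pvSet_add_mem _ _ hfx).symm
    · rw [pvSet_add_not_mem _ _ hx, List.map_append, List.map_singleton,
        pvSet_append_singleton, ih]

-- ofList commutes with filter (first occurrences are preserved by filtering)
theorem pvSet_ofList_filter {α : Type} [BEq α] [LawfulBEq α] (q : α → Bool) (l : List α) :
    PySem.Set.ofList (l.filter q) = (PySem.Set.ofList l).filter q := by
  induction l using List.reverseRecOn with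
  | nil => rfl
  | append_singleton l x ih =>
    rw [List.filter_append, pvSet_append_singleton]
    by_cases hq : q x = true
    · rw [show List.filter q [x] = [x] from by simp [hq], pvSet_append_singleton]
      by_cases hx : x ∈ PySem.Set.ofList l
      · rw [pvSet_add_mem _ _ hx]
        have hx2 : x ∈ PySem.Set.ofList (l.filter q) := by
          rw [PySem.Set.mem_ofList]
          exact List.mem_filter.mpr ⟨(PySem.Set.mem_ofList _ _).mp hx, hq⟩
        rw [pvSet_add_mem _ _ hx2, ih]
      · have hx2 : x ∉ PySem.Set.ofList (l.filter q) := by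
          rw [PySem.Set.mem_ofList]
          intro hmem
          exact hx ((PySem.Set.mem_ofList _ _).mpr (List.mem_filter.mp hmem).1)
        rw [pvSet_add_not_mem _ _ hx2, pvSet_add_not_mem _ _ hx, List.filter_append, ih,
          show List.filter q [x] = [x] from by simp [hq]]
    · rw [show List.filter q [x] = [] from by simp [hq], List.append_nil, ih]
      by_cases hx : x ∈ PySem.Set.ofList l
      · rw [pvSet_add_mem _ _ hx]
      · rw [pvSet_add_not_mem _ _ hx, List.filter_append,
          show List.filter q [x] = [] from by simp [hq], List.append_nil]

theorem pvKeys_mk {κ ν : Type} [BEq κ] (l : List (κ × ν)) :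
    (PySem.Dict.mk l).keys = l.map Prod.fst := by
  simp [PySem.Dict.keys]

theorem pvGetD_mk_of_mem {κ ν : Type} [BEq κ] [LawfulBEq κ] (l : List (κ × ν))
    (hnd : (l.map Prod.fst).Nodup) {k : κ} {v : ν} (h : (k, v) ∈ l) (d0 : ν) :
    (PySem.Dict.mk l).getD k d0 = v :=
  PySem.Dict.getD_of_mem_items _ h (by simpa [pvKeys_mk] using hnd) d0

theorem pvContains_mk {κ ν : Type} [BEq κ] [LawfulBEq κ] [DecidableEq κ] (l : List (κ × ν)) (k : κ) :
    (PySem.Dict.mk l).contains k = decide (k ∈ l.map Prod.fst) := by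
  rw [PySem.Dict.contains_eq_decide_mem_keys, pvKeys_mk]

theorem pvGetD_mk_of_not_mem {κ ν : Type} [BEq κ] [LawfulBEq κ] [DecidableEq κ] (l : List (κ × ν))
    {k : κ} (h : k ∉ l.map Prod.fst) (d0 : ν) :
    (PySem.Dict.mk l).getD k d0 = d0 :=
  PySem.Dict.getD_of_not_contains _ d0 (by rw [pvContains_mk]; simpa using h)

-- setdefault-then-insert at the same key is plain insert
theorem pvInsert_setdefault {κ ν : Type} [BEq κ] [LawfulBEq κ] (d : PySem.Dict κ ν) (k : κ) (v w : ν) :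
    (d.setdefault k v).insert k w = d.insert k w := by
  by_cases hc : d.contains k = true
  · rw [PySem.Dict.setdefault_of_contains _ _ hc]
  · rw [PySem.Dict.setdefault_of_not_contains _ _ (by simpa using hc),
      PySem.Dict.insert_insert_self]

theorem pvA_step_eq (r : PySem.Dict String (PySem.Dict String Int)) (c o : String) :
    pvA_step r c o = pvStep r (c, o) := by
  have hmod : ∀ d : PySem.Dict String Int,
      (d.setdefault o 0).modify o 0 (· + 1) = d.insert o (d.getD o 0 + 1) := by
    intro d
    show (d.setdefault o 0).insert o ((d.setdefault o 0).getD o 0 + 1) = _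
    rw [pvInsert_setdefault, PySem.Dict.getD_setdefault_self]
  simp only [pvA_step, pvStep, hmod]

-- group-dict lemmas: a dict of the shape mk (Kl.map (fun k => (k, g k)))
theorem pvGroup_keys {ν : Type} (Kl : List String) (g : String → ν) :
    (Kl.map (fun k => (k, g k))).map Prod.fst = Kl := by
  rw [List.map_map, show (Prod.fst ∘ fun k => (k, g k)) = id from rfl, List.map_id]

theorem pvGroup_getD_mem {ν : Type} (Kl : List String) (hnd : Kl.Nodup) (g : String → ν)
    {c : String} (hc : c ∈ Kl) (d0 : ν) :
    (PySem.Dict.mk (Kl.map (fun k => (k, g k)))).getD c d0 = g c := by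
  have hmem : (c, g c) ∈ Kl.map (fun k => (k, g k)) := List.mem_map.mpr ⟨c, hc, rfl⟩
  have hnd2 : ((Kl.map (fun k => (k, g k))).map Prod.fst).Nodup := by
    rw [pvGroup_keys]; exact hnd
  exact pvGetD_mk_of_mem _ hnd2 hmem d0

theorem pvGroup_getD_not_mem {ν : Type} (Kl : List String) (g : String → ν)
    {c : String} (hc : c ∉ Kl) (d0 : ν) :
    (PySem.Dict.mk (Kl.map (fun k => (k, g k)))).getD c d0 = d0 := by
  refine pvGetD_mk_of_not_mem _ ?_ d0
  rw [pvGroup_keys]; exact hc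

theorem pvGroup_contains {ν : Type} (Kl : List String) (g : String → ν) (c : String) :
    (PySem.Dict.mk (Kl.map (fun k => (k, g k)))).contains c = decide (c ∈ Kl) := by
  rw [pvContains_mk, pvGroup_keys]

-- inserting a new value at key c into a group dict, then reading the whole as a group over add Kl c
theorem pvGroup_insert {ν : Type} (Kl : List String) (_hnd : Kl.Nodup) (g g' : String → ν)
    (c : String) (v : ν) (hme : ∀ c' ∈ Kl, c' ≠ c → g' c' = g c') (hv : g' c = v) :
    (PySem.Dict.mk (Kl.map (fun k => (k, g k)))).insert c v
      = PySem.Dict.mk ((PySem.Set.add Kl c).map (fun k => (k, g' k))) := by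
  by_cases hc : c ∈ Kl
  · rw [pvSet_add_mem _ _ hc]
    apply PySem.Dict.ext
    rw [PySem.Dict.items_insert_of_contains _ _ (by rw [pvGroup_contains]; simpa using hc)]
    show (Kl.map _).map _ = Kl.map _
    rw [List.map_map]
    apply List.map_congr_left
    intro k hk
    by_cases hkc : k = c
    · subst hkc; simp [hv]
    · show (if ((k, g k).1 == c) = true then (c, v) else (k, g k)) = (k, g' k)
      rw [if_neg (by simpa using hkc), hme k hk hkc]
  · rw [pvSet_add_not_mem _ _ hc]
    apply PySem.Dict.ext
    rw [PySem.Dict.items_insert_of_not_contains _ _ (by rw [pvGroup_contains]; simpa using hc)]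
    show Kl.map _ ++ [(c, v)] = (Kl ++ [c]).map _
    rw [List.map_append, List.map_singleton]
    congr 1
    · exact List.map_congr_left fun k hk => by rw [hme k hk (fun e => hc (e ▸ hk))]
    · rw [hv]

-- count bookkeeping
theorem pvCount_append_ne {α : Type} [BEq α] [LawfulBEq α] (ps : List α) (p q : α) (h : q ≠ p) :
    (ps ++ [p]).count q = ps.count q := by
  rw [List.count_append]
  have h0 : [p].count q = 0 := List.count_eq_zero.mpr (by simpa using h)
  omega

theorem pvCount_append_self {α : Type} [BEq α] [LawfulBEq α] (ps : List α) (p : α) :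
    (ps ++ [p]).count p = ps.count p + 1 := by
  rw [List.count_append]; simp

-- inner keys of the canonical table are distinct
theorem pvInner_keys_nodup (ps : List (String × String)) (c : String) :
    (((PySem.Set.ofList ps).filter (fun p => p.1 == c)).map (fun p : String × String => p.2)).Nodup := by
  have h1 : ((PySem.Set.ofList ps).filter (fun p => p.1 == c)).Nodup :=
    (PySem.Set.nodup_ofList ps).filter _
  refine List.Nodup.map_on ?_ h1
  intro x hx y hy hxy
  have hx1 : x.1 = c := by simpa using List.of_mem_filter hx
  have hy1 : y.1 = c := by simpa using List.of_mem_filter hy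
  obtain ⟨a, b⟩ := x; obtain ⟨a', b'⟩ := y
  simp only at hx1 hy1 hxy
  rw [hx1, hy1, hxy]

theorem pvInner_not_key (ps : List (String × String)) {c o : String} (hm : (c, o) ∉ ps) :
    o ∉ (pvInner ps c).map Prod.fst := by
  unfold pvInner
  rw [List.map_map]
  intro hmem
  obtain ⟨q, hq, hq2⟩ := List.mem_map.mp hmem
  obtain ⟨hqS, hq1⟩ := List.mem_filter.mp hq
  have hq1' : q.1 = c := by simpa using hq1
  have hq2' : q.2 = o := hq2
  have hqe : q = (c, o) := by obtain ⟨a, b⟩ := q; simp only at hq1' hq2'; rw [hq1', hq2']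
  exact hm (hqe ▸ (PySem.Set.mem_ofList _ _).mp hqS)

-- appending a pair with a different first component leaves that group unchanged
theorem pvInner_other (ps : List (String × String)) {c c' : String} (o : String) (hne : c' ≠ c) :
    pvInner (ps ++ [(c, o)]) c' = pvInner ps c' := by
  unfold pvInner
  have hcong : ∀ q ∈ (PySem.Set.ofList ps).filter (fun p => p.1 == c'),
      (q.2, (((ps ++ [(c, o)]).count q : Int))) = (q.2, ((ps.count q : Int))) := by
    intro q hq
    have hq1 : q.1 = c' := by simpa using List.of_mem_filter hq
    have hqp : q ≠ (c, o) := fun e => hne (by rw [e] at hq1; exact hq1.symm)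
    rw [pvCount_append_ne _ _ _ hqp]
  by_cases hp : (c, o) ∈ PySem.Set.ofList ps
  · rw [pvSet_append_singleton, pvSet_add_mem _ _ hp]
    exact List.map_congr_left hcong
  · rw [pvSet_append_singleton, pvSet_add_not_mem _ _ hp, List.filter_append]
    have hcc : ((c, o).1 == c') = false := by simpa using fun e => hne e.symm
    rw [show List.filter (fun p => p.1 == c') [(c, o)] = [] from by simp [hcc],
      List.append_nil]
    exact List.map_congr_left hcong

theorem pvInner_insert (ps : List (String × String)) (c o : String) :
    (PySem.Dict.mk (pvInner ps c)).insert o ((ps.count (c, o) : Int) + 1)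
      = PySem.Dict.mk (pvInner (ps ++ [(c, o)]) c) := by
  by_cases hm : (c, o) ∈ ps
  · have hmS : (c, o) ∈ PySem.Set.ofList ps := (PySem.Set.mem_ofList _ _).mpr hm
    have hf : (c, o) ∈ (PySem.Set.ofList ps).filter (fun p => p.1 == c) :=
      List.mem_filter.mpr ⟨hmS, by simp⟩
    have hco : (PySem.Dict.mk (pvInner ps c)).contains o = true := by
      rw [pvContains_mk]
      apply decide_eq_true
      unfold pvInner; rw [List.map_map]
      exact List.mem_map.mpr ⟨(c, o), hf, rfl⟩
    apply PySem.Dict.ext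
    rw [PySem.Dict.items_insert_of_contains _ _ hco]
    show (pvInner ps c).map _ = pvInner (ps ++ [(c, o)]) c
    unfold pvInner
    rw [pvSet_append_singleton, pvSet_add_mem _ _ hmS, List.map_map]
    apply List.map_congr_left
    intro q hq
    have hq1 : q.1 = c := by simpa using List.of_mem_filter hq
    by_cases hqo : q.2 = o
    · have hqp : q = (c, o) := by
        obtain ⟨a, b⟩ := q; simp only at hq1 hqo; rw [hq1, hqo]
      rw [hqp]
      show (if (o == o) = true then (o, (ps.count (c, o) : Int) + 1) else _)
          = (o, ((ps ++ [(c, o)]).count (c, o) : Int))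
      rw [if_pos (by simp), pvCount_append_self]
      push_cast
      ring_nf
    · have hqp : q ≠ (c, o) := fun e => hqo (by rw [e])
      have hcntq : (ps ++ [(c, o)]).count q = ps.count q := pvCount_append_ne _ _ _ hqp
      show (if (q.2 == o) = true then (o, (ps.count (c, o) : Int) + 1) else (q.2, (ps.count q : Int)))
          = (q.2, ((ps ++ [(c, o)]).count q : Int))
      rw [if_neg (by simp [hqo]), hcntq]
  · have hco : (PySem.Dict.mk (pvInner ps c)).contains o = false := by
      rw [pvContains_mk]
      simpa using pvInner_not_key ps hm
    apply PySem.Dict.ext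
    rw [PySem.Dict.items_insert_of_not_contains _ _ hco]
    show pvInner ps c ++ [(o, (ps.count (c, o) : Int) + 1)] = pvInner (ps ++ [(c, o)]) c
    have hmS : (c, o) ∉ PySem.Set.ofList ps := fun hx => hm ((PySem.Set.mem_ofList _ _).mp hx)
    unfold pvInner
    rw [pvSet_append_singleton, pvSet_add_not_mem _ _ hmS, List.filter_append, List.map_append]
    congr 1
    · apply List.map_congr_left
      intro q hq
      have hqS : q ∈ ps := (PySem.Set.mem_ofList _ _).mp (List.mem_filter.mp hq).1
      have hqp : q ≠ (c, o) := fun e => hm (e ▸ hqS)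
      rw [pvCount_append_ne _ _ _ hqp]
    · have h0 : ps.count (c, o) = 0 := List.count_eq_zero.mpr hm
      simp [h0]

theorem pvInner_getD (ps : List (String × String)) (c o : String) :
    (PySem.Dict.mk (pvInner ps c)).getD o 0 = (ps.count (c, o) : Int) := by
  by_cases hm : (c, o) ∈ ps
  · have hmS : (c, o) ∈ PySem.Set.ofList ps := (PySem.Set.mem_ofList _ _).mpr hm
    have hf : (c, o) ∈ (PySem.Set.ofList ps).filter (fun p => p.1 == c) :=
      List.mem_filter.mpr ⟨hmS, by simp⟩
    have hitem : (o, (ps.count (c, o) : Int)) ∈ pvInner ps c := by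
      unfold pvInner; exact List.mem_map.mpr ⟨(c, o), hf, rfl⟩
    refine pvGetD_mk_of_mem _ ?_ hitem 0
    show ((pvInner ps c).map Prod.fst).Nodup
    unfold pvInner
    rw [List.map_map]
    exact pvInner_keys_nodup ps c
  · rw [pvGetD_mk_of_not_mem _ (pvInner_not_key ps hm) 0]
    have h0 : ps.count (c, o) = 0 := List.count_eq_zero.mpr hm
    simp [h0]

theorem pvCanon_step (ps : List (String × String)) (c o : String) :
    pvStep (pvCanon ps) (c, o) = pvCanon (ps ++ [(c, o)]) := by
  have hnd := PySem.Set.nodup_ofList (ps.map Prod.fst)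
  have hmapf : ((ps ++ [(c, o)]).map Prod.fst) = ps.map Prod.fst ++ [c] := by simp
  by_cases hc : c ∈ PySem.Set.ofList (ps.map Prod.fst)
  · show (pvCanon ps).insert c _ = _
    rw [show (pvCanon ps).getD c PySem.Dict.empty = PySem.Dict.mk (pvInner ps c) from
        pvGroup_getD_mem _ (PySem.Set.nodup_ofList _) _ hc _]
    rw [show (PySem.Dict.mk (pvInner ps c)).getD o 0 = (ps.count (c, o) : Int) from pvInner_getD ps c o,
      pvInner_insert]
    unfold pvCanon
    rw [hmapf, pvSet_append_singleton]
    exact pvGroup_insert _ hnd _ _ c _ (fun c' _ hne => by rw [pvInner_other ps o hne]) rfl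
  · show (pvCanon ps).insert c _ = _
    rw [show (pvCanon ps).getD c PySem.Dict.empty = PySem.Dict.empty from
        pvGroup_getD_not_mem _ _ hc _]
    have h0 : pvInner ps c = [] := by
      unfold pvInner
      rw [List.filter_eq_nil_iff.mpr ?_, List.map_nil]
      intro q hq hbq
      have hq1 : q.1 = c := by simpa using hbq
      exact hc ((PySem.Set.mem_ofList _ _).mpr
        (List.mem_map.mpr ⟨q, (PySem.Set.mem_ofList _ _).mp hq, hq1⟩))
    have hmem : (c, o) ∉ ps := fun hx =>
      hc ((PySem.Set.mem_ofList _ _).mpr (List.mem_map.mpr ⟨(c, o), hx, rfl⟩))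
    have hcnt : (ps.count (c, o) : Int) = 0 := by simp [List.count_eq_zero.mpr hmem]
    have hval : (PySem.Dict.empty : PySem.Dict String Int).insert o
          ((PySem.Dict.empty : PySem.Dict String Int).getD o 0 + 1)
        = (PySem.Dict.mk (pvInner ps c)).insert o ((ps.count (c, o) : Int) + 1) := by
      rw [h0, hcnt]
      rfl
    rw [hval, pvInner_insert]
    unfold pvCanon
    rw [hmapf, pvSet_append_singleton]
    exact pvGroup_insert _ hnd _ _ c _ (fun c' _ hne => by rw [pvInner_other ps o hne]) rfl

theorem pvFoldl_step (ps : List (String × String)) :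
    ps.foldl pvStep PySem.Dict.empty = pvCanon ps := by
  induction ps using List.reverseRecOn with
  | nil => rfl
  | append_singleton l x ih =>
    obtain ⟨c, o⟩ := x
    rw [List.foldl_append, List.foldl_cons, List.foldl_nil, ih, pvCanon_step]

-- A's loop is the fold of pvStep over the adjacent pairs
theorem pvA_loop_eq (full : List Char) (cs : List Char) : ∀ (i : Nat)
    (r : PySem.Dict String (PySem.Dict String Int)), full.drop i = cs →
    pvA_loop full cs i r
      = ((cs.zip (full.drop (i + 1))).map (fun p => (String.ofList [p.1], String.ofList [p.2]))).foldl pvStep r := by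
  induction cs with
  | nil => intro i r _; simp [pvA_loop]
  | cons ch rest ih =>
    intro i r h
    have hdrop1 : full.drop (i + 1) = rest := by rw [← List.tail_drop, h]; rfl
    have hidx : PySem.List.pyGet? full ((i : Int) + 1) = rest.head? := by
      have h1 : ((i : Int) + 1) = ((i + 1 : Nat) : Int) := by push_cast; ring
      rw [h1, PySem.List.pyGet?_natCast, ← List.head?_drop, hdrop1]
    simp only [pvA_loop]
    rw [hidx]
    cases rest with
    | nil => simp [hdrop1]
    | cons out rest' =>
      simp only [List.head?_cons]
      rw [ih (i + 1) _ hdrop1, pvA_step_eq]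
      have hdrop2 : full.drop (i + 1 + 1) = rest' := by rw [← List.tail_drop, hdrop1]; rfl
      rw [hdrop1, hdrop2]
      simp [List.zip_cons_cons]

-- ===== B-side lemmas =====

-- a fold of fresh inserts over distinct keys is the literal association list
theorem pvFoldInsert {ν : Type} (g : String → ν) (Kl : List String) (hnd : Kl.Nodup) :
    Kl.foldl (fun r c => r.insert c (g c)) PySem.Dict.empty
      = PySem.Dict.mk (Kl.map (fun c => (c, g c))) := by
  induction Kl using List.reverseRecOn with
  | nil => rfl
  | append_singleton l x ih =>
    rw [List.nodup_append] at hnd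
    obtain ⟨h1, _, h3⟩ := hnd
    have hx : x ∉ l := fun hmem => h3 x hmem x (by simp) rfl
    rw [List.foldl_append, List.foldl_cons, List.foldl_nil, ih h1]
    apply PySem.Dict.ext
    rw [PySem.Dict.items_insert_of_not_contains _ _ (by rw [pvGroup_contains]; simpa using hx)]
    show l.map _ ++ [(x, g x)] = (l ++ [x]).map _
    rw [List.map_append, List.map_singleton]

-- count of a successor in c's group = count of the pair in the whole list
theorem pvCount_outs (ps : List (String × String)) (c o : String) :
    ((ps.filter (fun p => p.1 == c)).map (fun p : String × String => p.2)).count o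
      = ps.count (c, o) := by
  induction ps with
  | nil => rfl
  | cons p rest ih =>
    by_cases h1 : p.1 = c
    · rw [List.filter_cons_of_pos (by simpa using h1), List.map_cons, List.count_cons,
        List.count_cons, ih]
      have he : (p == (c, o)) = (p.2 == o) := by
        obtain ⟨a, b⟩ := p
        simp only at h1
        subst h1
        simp [Prod.ext_iff]
      rw [he]
    · rw [List.filter_cons_of_neg (by simpa using h1), List.count_cons, ih]
      have he : (p == (c, o)) = false := by
        apply beq_eq_false_iff_ne.mpr
        intro e
        exact h1 (by rw [e])
      rw [he]
      simp

-- B's row for c is the canonical inner table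
theorem pvRow_eq (ps : List (String × String)) (c : String) :
    pvB_row ps c = PySem.Dict.mk (pvInner ps c) := by
  unfold pvB_row
  simp only [PySem.List.dedup_eq_ofList]
  set outs := (ps.filter (fun p => p.1 == c)).map (fun p : String × String => p.2) with houts
  rw [pvFoldInsert _ _ (PySem.Set.nodup_ofList outs)]
  apply congrArg PySem.Dict.mk
  have hset : PySem.Set.ofList outs
      = ((PySem.Set.ofList ps).filter (fun p => p.1 == c)).map (fun p : String × String => p.2) := by
    rw [houts, ← pvSet_ofList_map_ofList (fun p : String × String => p.2) (ps.filter _),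
      pvSet_ofList_filter]
    exact PySem.Set.ofList_eq_self_of_nodup _ (pvInner_keys_nodup ps c)
  rw [hset]
  unfold pvInner
  rw [List.map_map]
  apply List.map_congr_left
  intro q hq
  have hq1 : q.1 = c := by simpa using List.of_mem_filter hq
  show (q.2, (outs.count q.2 : Int)) = (q.2, (ps.count q : Int))
  rw [houts, pvCount_outs ps c q.2, show (c, q.2) = q from by
    obtain ⟨a, b⟩ := q; simp only at hq1; rw [hq1]]

-- B's outer fold builds the canonical table
theorem pvB_eq_canon (ps : List (String × String)) :
    (PySem.List.dedup (ps.map (fun p => p.1))).foldl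
        (fun r c => r.insert c (pvB_row ps c)) PySem.Dict.empty
      = pvCanon ps := by
  simp only [PySem.List.dedup_eq_ofList]
  rw [pvFoldInsert _ _ (PySem.Set.nodup_ofList _)]
  unfold pvCanon
  apply congrArg PySem.Dict.mk
  exact List.map_congr_left fun c _ => by rw [pvRow_eq]

-- the whole pipeline, on the character list
theorem pvMain (cs : List Char) :
    pvA_loop cs cs 0 PySem.Dict.empty
      = (PySem.List.dedup (((cs.zip (PySem.List.slice cs (some 1))).map
            (fun p => (String.ofList [p.1], String.ofList [p.2]))).map (fun p => p.1))).foldl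
          (fun r c => r.insert c (pvB_row
            ((cs.zip (PySem.List.slice cs (some 1))).map
              (fun p => (String.ofList [p.1], String.ofList [p.2]))) c))
          PySem.Dict.empty := by
  have hslice : PySem.List.slice cs (some 1) = cs.tail := by
    rw [PySem.List.slice_from _ (by norm_num)]
    simp [List.drop_one]
  have hA : pvA_loop cs cs 0 PySem.Dict.empty = pvCanon (pvPairs cs) := by
    rw [pvA_loop_eq cs cs 0 PySem.Dict.empty List.drop_zero]
    rw [show (0 : Nat) + 1 = 1 from rfl, List.drop_one]
    rw [show ((cs.zip cs.tail).map (fun p => (String.ofList [p.1], String.ofList [p.2]))) = pvPairs cs from rfl]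
    exact pvFoldl_step _
  rw [hslice,
    show ((cs.zip cs.tail).map (fun p => (String.ofList [p.1], String.ofList [p.2]))) = pvPairs cs from rfl,
    hA, pvB_eq_canon]

-- ===== VERDICT (by name: the statement is the Claim_ definition above) =====
theorem get_table_refactored_spec : Claim_equal_get_table_refactored := by
  intro data _
  show get_table_refactored data = get_table_refactored_alt data
  exact congrArg (fun d => (PySem.Dict.items d).map (fun p => (p.1, p.2.items))) (pvMain data.toList)
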